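-- pv_equiv track=rewrite | github.com/unprintable123/CTF-writeups | ctfs/hitcon-ctf-2025/gcm/solve.py | granular_mult
-- ===== SOURCE A (Python) =====
-- def granular_mult(a: int, b: int) -> int:
--     c = 0
--     for i in range(8, -1, -1):
--         if (a >> i) & 1:
--             c ^= b
--
--         if b & 1:
--             b = (b >> 1) ^ 0b10111000
--         else:
--             b >>= 1
--
--     return c
-- ===== SOURCE B (Python) =====
-- def granular_mult(a: int, b: int) -> int:
--     # Horner-style variant: b is never modified; instead the GF reduction step
--     # is applied to the accumulator c, scanning a's bits from LSB upward.
--     c = 0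
--     for i in range(9):
--         c = (c >> 1) ^ 0b10111000 if c & 1 else c >> 1
--         if (a >> i) & 1:
--             c ^= b
--     return c
-- ===== Notes on version B (the rewrite author's own statement) =====
-- stated objective: alternative
-- what changed: A evolves the multiplicand b through the GF reduction step while XOR-ing it into a plain accumulator, scanning a's bits high-to-low; B never touches b: it applies the reduction step to the accumulator itself (Horner's rule for the carryless product) and scans a's bits low-to-high, XOR-ing the fixed b in.
import Mathlib
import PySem

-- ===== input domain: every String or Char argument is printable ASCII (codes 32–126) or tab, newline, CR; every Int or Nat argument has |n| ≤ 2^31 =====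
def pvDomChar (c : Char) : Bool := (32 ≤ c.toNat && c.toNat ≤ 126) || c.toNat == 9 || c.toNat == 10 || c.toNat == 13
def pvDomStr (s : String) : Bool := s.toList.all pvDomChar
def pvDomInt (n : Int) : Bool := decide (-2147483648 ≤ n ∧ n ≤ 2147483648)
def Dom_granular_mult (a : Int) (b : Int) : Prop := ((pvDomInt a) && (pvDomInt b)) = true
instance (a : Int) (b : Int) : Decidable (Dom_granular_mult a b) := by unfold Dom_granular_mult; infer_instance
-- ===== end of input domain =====

-- B is Horner's rule for the carryless product: A evolves b through the reduction step and
-- XORs it into a plain accumulator scanning a's bits high-to-low; B keeps b fixed, applies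
-- the reduction step to the accumulator itself and scans a's bits low-to-high (alternative
-- algorithm, same cost).


-- ===== PORT A =====
def granular_mult (a : Int) (b : Int) : Int :=
  ((PySem.List.pyRange 8 (-1) (-1)).foldl (fun (s : Int × Int) i =>
    let c := if PySem.Int.band (a >>> (i.toNat : Int)) 1 ≠ 0 then PySem.Int.bxor s.1 s.2 else s.1
    let b := if PySem.Int.band s.2 1 ≠ 0 then PySem.Int.bxor (s.2 >>> (1:Nat)) 0b10111000
             else s.2 >>> (1:Nat)
    (c, b)) (0, b)).1

-- ===== PORT B =====
def granular_mult_alt (a : Int) (b : Int) : Int :=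
  (PySem.List.pyRange 0 9 1).foldl (fun (c : Int) i =>
    let c := if PySem.Int.band c 1 ≠ 0 then PySem.Int.bxor (c >>> (1:Nat)) 0b10111000
             else c >>> (1:Nat)
    if PySem.Int.band (a >>> (i.toNat : Int)) 1 ≠ 0 then PySem.Int.bxor c b else c) 0

-- ===== PRECONDITION & SPEC =====
def Spec_granular_mult (a : Int) (b : Int) (out : Int) : Prop := out = granular_mult_alt a b
instance (a : Int) (b : Int) (out : Int) : Decidable (Spec_granular_mult a b out) := by unfold Spec_granular_mult; infer_instance

-- ===== CLAIM (what is proved, stated in full; the proofs are below) =====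
def Claim_equal_granular_mult : Prop := ∀ (a : Int) (b : Int), Dom_granular_mult a b → Spec_granular_mult a b (granular_mult a b)

-- ===== LEMMAS AND PROOFS =====

-- the GF(2) reduction step both loops apply (A to b, B to the accumulator)
def pvStep (x : Int) : Int :=
  if PySem.Int.band x 1 ≠ 0 then PySem.Int.bxor (x >>> (1:Nat)) 0b10111000 else x >>> (1:Nat)

-- bxor on Int constructors (Python's infinite two's complement)
lemma bxor_cast_negSucc (m n : Nat) : PySem.Int.bxor (↑m) (Int.negSucc n) = Int.negSucc (m ^^^ n) := by
  simp [PySem.Int.bxor, Int.negSucc_eq]; omega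
lemma bxor_negSucc_cast (m n : Nat) : PySem.Int.bxor (Int.negSucc m) (↑n) = Int.negSucc (m ^^^ n) := by
  simp [PySem.Int.bxor, Int.negSucc_eq]; omega
lemma bxor_negSucc_negSucc (m n : Nat) : PySem.Int.bxor (Int.negSucc m) (Int.negSucc n) = ↑(m ^^^ n) := by
  simp [PySem.Int.bxor, Int.negSucc_eq]; omega

lemma xor_mod_two (m n : Nat) : (m ^^^ n) % 2 = (m % 2 + n % 2) % 2 := by
  have h := Nat.and_xor_distrib_right (a := m) (b := n) (c := 1)
  simp only [Nat.and_one_is_mod] at h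
  rcases Nat.mod_two_eq_zero_or_one m with hm | hm <;> rcases Nat.mod_two_eq_zero_or_one n with hn | hn <;>
    rw [h, hm, hn] <;> rfl

lemma pvStep_cast (k : Nat) :
    pvStep (↑k) = if k % 2 = 1 then (↑((k >>> 1) ^^^ 184) : Int) else ↑(k >>> 1) := by
  have hb : PySem.Int.band (↑k) 1 = (↑(k % 2) : Int) := by
    have : (1 : Int) = ((1 : Nat) : Int) := rfl
    rw [this, PySem.Int.band_natCast, Nat.and_one_is_mod]
  have hs : ((k : Nat) : Int) >>> (1:Nat) = (↑(k >>> 1) : Int) := rfl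
  have h184 : (0b10111000 : Int) = ((184 : Nat) : Int) := rfl
  simp only [pvStep, hb, hs, h184, PySem.Int.bxor_natCast]
  rcases Nat.mod_two_eq_zero_or_one k with h | h <;> simp [h]

lemma pvStep_negSucc (k : Nat) :
    pvStep (Int.negSucc k) = if k % 2 = 0 then Int.negSucc ((k >>> 1) ^^^ 184) else Int.negSucc (k >>> 1) := by
  have hb : PySem.Int.band (Int.negSucc k) 1 = (↑((k + 1) % 2) : Int) := by
    simp [PySem.Int.band, Int.negSucc_eq]; omega
  have hs : (Int.negSucc k) >>> (1:Nat) = Int.negSucc (k >>> 1) := rfl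
  have h184 : (0b10111000 : Int) = ((184 : Nat) : Int) := rfl
  simp only [pvStep, hb, hs, h184, bxor_negSucc_cast]
  rcases Nat.mod_two_eq_zero_or_one k with h | h <;> simp [h, Nat.add_mod]

lemma shift_cast (k : Nat) : ((k : Nat) : Int) >>> (1:Nat) = ((k >>> 1 : Nat) : Int) := rfl

lemma pvStep_zero : pvStep 0 = 0 := by decide

-- pvStep is XOR-linear (bitwise over Python's infinite two's complement, every Int)
lemma pvStep_bxor (x y : Int) : pvStep (PySem.Int.bxor x y) = PySem.Int.bxor (pvStep x) (pvStep y) := by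
  rcases x with m | m <;> rcases y with n | n <;>
    rcases Nat.mod_two_eq_zero_or_one m with hm | hm <;>
    rcases Nat.mod_two_eq_zero_or_one n with hn | hn <;>
    try simp only [Int.ofNat_eq_natCast, PySem.Int.bxor_natCast, bxor_cast_negSucc, bxor_negSucc_cast,
      bxor_negSucc_negSucc, pvStep_cast, pvStep_negSucc, xor_mod_two, hm, hn]
  all_goals try norm_num
  all_goals try simp only [shift_cast, PySem.Int.bxor_natCast, bxor_cast_negSucc,
    bxor_negSucc_cast, bxor_negSucc_negSucc, Nat.shiftRight_xor_distrib]
  all_goals (first | rfl | simp [Nat.xor_assoc, Nat.xor_comm, Nat.xor_left_comm])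

lemma bxor_assoc (x y z : Int) :
    PySem.Int.bxor (PySem.Int.bxor x y) z = PySem.Int.bxor x (PySem.Int.bxor y z) := by
  rcases x with m | m <;> rcases y with n | n <;> rcases z with k | k <;>
    try simp only [Int.ofNat_eq_natCast, PySem.Int.bxor_natCast, bxor_cast_negSucc, bxor_negSucc_cast,
      bxor_negSucc_negSucc]
  all_goals (first | rfl | simp [Nat.xor_assoc])

lemma bxor_left_comm (x y z : Int) :
    PySem.Int.bxor x (PySem.Int.bxor y z) = PySem.Int.bxor y (PySem.Int.bxor x z) := by
  rw [← bxor_assoc, PySem.Int.bxor_comm x y, bxor_assoc]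

lemma bxor_zero_left (x : Int) : PySem.Int.bxor 0 x = x := by
  rw [PySem.Int.bxor_comm]; exact PySem.Int.bxor_zero x

lemma ite_bxor_push (p : Prop) [Decidable p] (c x : Int) :
    (if p then PySem.Int.bxor c x else c) = PySem.Int.bxor c (if p then x else 0) := by
  split <;> simp [PySem.Int.bxor_zero]

-- pvStep applied once per element of l (B's remaining-iteration count)
def stepTail : List Int → Int → Int
  | [], b => b
  | _ :: l, b => pvStep (stepTail l b)

lemma stepTail_step (l : List Int) (x : Int) : stepTail l (pvStep x) = pvStep (stepTail l x) := by
  induction l with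
  | nil => rfl
  | cons i l ih => simp [stepTail, ih]

lemma stepTail_bxor (l : List Int) (x y : Int) :
    stepTail l (PySem.Int.bxor x y) = PySem.Int.bxor (stepTail l x) (stepTail l y) := by
  induction l with
  | nil => rfl
  | cons i l ih => simp [stepTail, ih, pvStep_bxor]

lemma stepTail_ite (l : List Int) (p : Prop) [Decidable p] (x y : Int) :
    stepTail l (if p then x else y) = if p then stepTail l x else stepTail l y := by split <;> rfl

lemma stepTail_zero (l : List Int) : stepTail l 0 = 0 := by
  induction l with
  | nil => rfl
  | cons i l ih => simp [stepTail, ih, pvStep_zero]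

-- the XOR-sum A's loop accumulates: bit i of a selects the reduction chain of b
def xsum (a : Int) : List Int → Int → Int
  | [], _ => 0
  | i :: l, b =>
    PySem.Int.bxor (if PySem.Int.band (a >>> (i.toNat : Int)) 1 ≠ 0 then b else 0)
      (xsum a l (pvStep b))

-- the XOR-sum B's loop accumulates: bit i of a selects b stepped once per remaining iteration
def ysum (a b : Int) : List Int → Int
  | [] => 0
  | i :: l =>
    PySem.Int.bxor (if PySem.Int.band (a >>> (i.toNat : Int)) 1 ≠ 0 then stepTail l b else 0)
      (ysum a b l)

lemma A_char (a : Int) (l : List Int) (c b : Int) :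
    (l.foldl (fun (s : Int × Int) i =>
      let c := if PySem.Int.band (a >>> (i.toNat : Int)) 1 ≠ 0 then PySem.Int.bxor s.1 s.2 else s.1
      let b := if PySem.Int.band s.2 1 ≠ 0 then PySem.Int.bxor (s.2 >>> (1:Nat)) 0b10111000
               else s.2 >>> (1:Nat)
      (c, b)) (c, b)).1 = PySem.Int.bxor c (xsum a l b) := by
  induction l generalizing c b with
  | nil => simp [xsum, PySem.Int.bxor_zero]
  | cons i l ih =>
    rw [List.foldl_cons]
    change (List.foldl _
      ((if PySem.Int.band (a >>> (i.toNat : Int)) 1 ≠ 0 then PySem.Int.bxor c b else c),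
        pvStep b) l).1 = _
    rw [ih, ite_bxor_push, bxor_assoc]
    rfl

lemma B_char (a b : Int) (l : List Int) (c : Int) :
    (l.foldl (fun (c : Int) i =>
      let c := if PySem.Int.band c 1 ≠ 0 then PySem.Int.bxor (c >>> (1:Nat)) 0b10111000
               else c >>> (1:Nat)
      if PySem.Int.band (a >>> (i.toNat : Int)) 1 ≠ 0 then PySem.Int.bxor c b else c) c)
    = PySem.Int.bxor (stepTail l c) (ysum a b l) := by
  induction l generalizing c with
  | nil => simp [ysum, stepTail, PySem.Int.bxor_zero]
  | cons i l ih =>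
    rw [List.foldl_cons]
    change List.foldl _
      (if PySem.Int.band (a >>> (i.toNat : Int)) 1 ≠ 0 then PySem.Int.bxor (pvStep c) b
       else pvStep c) l = _
    rw [ih, ite_bxor_push, stepTail_bxor, stepTail_step, stepTail_ite, stepTail_zero]
    rw [show ysum a b (i :: l) = PySem.Int.bxor
      (if PySem.Int.band (a >>> (i.toNat : Int)) 1 ≠ 0 then stepTail l b else 0)
      (ysum a b l) from rfl]
    rw [bxor_assoc]
    rfl

-- ===== VERDICT (by name: the statement is the Claim_ definition above) =====
set_option maxHeartbeats 4000000 in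
theorem granular_mult_spec : Claim_equal_granular_mult := by
  intro a b _
  unfold Spec_granular_mult granular_mult granular_mult_alt
  rw [show PySem.List.pyRange 8 (-1) (-1) = [8, 7, 6, 5, 4, 3, 2, 1, 0] by decide,
      show PySem.List.pyRange 0 9 1 = [0, 1, 2, 3, 4, 5, 6, 7, 8] by decide]
  rw [A_char, B_char, stepTail_zero, bxor_zero_left, bxor_zero_left]
  simp only [xsum, ysum, stepTail]
  simp only [PySem.Int.bxor_comm, bxor_left_comm, bxor_zero_left]
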